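-- pv_equiv track=rewrite | github.com/haitwang-cloud/pythonMultiThreading | waterDrink.py | drinkWater
-- ===== SOURCE A (Python) =====
-- def drinkWater(bottle, gap, drink):
--     if bottle < 4 and gap < 2:
--         return drink
--     counter = gap//2+bottle//4
--     drink += counter
--     bottle = counter+bottle % 4
--     gap = counter+gap % 2
--     return drinkWater(bottle,gap,drink)
-- ===== SOURCE B (Python) =====
-- def drinkWater(bottle, gap, drink):
--     total = 0
--     while bottle >= 4 or gap >= 2:
--         c = bottle // 4 + gap // 2
--         total += c
--         bottle = bottle % 4 + c
--         gap = gap % 2 + c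
--     return drink + total
-- ===== Notes on version B (the rewrite author's own statement) =====
-- stated objective: idiomatic
-- what changed: The tail recursion threading the drink accumulator is replaced by an iterative while loop that accumulates the earned drinks in a separate counter and adds it to drink once at the end.
import Mathlib
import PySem

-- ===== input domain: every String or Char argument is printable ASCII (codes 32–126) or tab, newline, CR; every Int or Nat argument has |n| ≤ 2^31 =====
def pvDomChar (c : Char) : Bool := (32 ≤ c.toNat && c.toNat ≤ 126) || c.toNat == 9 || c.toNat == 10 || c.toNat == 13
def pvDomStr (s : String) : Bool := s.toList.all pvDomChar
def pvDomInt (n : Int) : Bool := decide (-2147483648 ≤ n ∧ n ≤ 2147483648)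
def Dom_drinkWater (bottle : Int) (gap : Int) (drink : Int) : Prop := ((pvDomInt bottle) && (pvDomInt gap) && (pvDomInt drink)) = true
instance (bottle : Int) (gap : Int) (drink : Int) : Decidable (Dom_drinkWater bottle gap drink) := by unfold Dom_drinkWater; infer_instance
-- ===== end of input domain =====

-- B replaces A's accumulator-threading tail recursion by a while loop that sums the
-- earned drinks separately and adds them to `drink` once at the end (same arithmetic, same cost).

-- Termination measure shared by both ports (the Python recursion/loop always terminates;
-- the measure also serves as the fuel that makes the ports structurally recursive).
def pvMu (b : Int) (g : Int) : Nat :=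
  if b < 4 ∧ g < 2 then 0
  else if 0 ≤ b ∧ 0 ≤ g then 3 * (b + g).toNat + g.toNat + 1
  else 5 * (b.natAbs + g.natAbs) + 6

-- ===== PORT A =====
-- fuel-based transcription of A's recursion; fuel = pvMu never runs out (pvMu_lt below),
-- and at fuel 0 the guard necessarily holds, so returning drink is A's value there too
def drinkWaterGo : Nat → Int → Int → Int → Int
  | 0, _, _, drink => drink
  | n + 1, bottle, gap, drink =>
    if bottle < 4 ∧ gap < 2 then drink
    else
      let counter := PySem.Int.floordiv gap 2 + PySem.Int.floordiv bottle 4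
      drinkWaterGo n (counter + PySem.Int.mod bottle 4) (counter + PySem.Int.mod gap 2) (drink + counter)

def drinkWater (bottle : Int) (gap : Int) (drink : Int) : Int :=
  drinkWaterGo (pvMu bottle gap) bottle gap drink

-- ===== PORT B =====
-- the while loop of Source B: state (bottle, gap, total), runs while bottle >= 4 or gap >= 2
def drinkWaterLoopGo : Nat → Int → Int → Int → Int
  | 0, _, _, total => total
  | n + 1, bottle, gap, total =>
    if bottle ≥ 4 ∨ gap ≥ 2 then
      let c := PySem.Int.floordiv bottle 4 + PySem.Int.floordiv gap 2
      drinkWaterLoopGo n (PySem.Int.mod bottle 4 + c) (PySem.Int.mod gap 2 + c) (total + c)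
    else total

def drinkWater_alt (bottle : Int) (gap : Int) (drink : Int) : Int :=
  drink + drinkWaterLoopGo (pvMu bottle gap) bottle gap 0

-- ===== PRECONDITION & SPEC =====
def Spec_drinkWater (bottle : Int) (gap : Int) (drink : Int) (out : Int) : Prop := out = drinkWater_alt bottle gap drink
instance (bottle : Int) (gap : Int) (drink : Int) (out : Int) : Decidable (Spec_drinkWater bottle gap drink out) := by unfold Spec_drinkWater; infer_instance

-- ===== CLAIM (what is proved, stated in full; the proofs are below) =====
def Claim_equal_drinkWater : Prop := ∀ (bottle : Int) (gap : Int) (drink : Int), Dom_drinkWater bottle gap drink → Spec_drinkWater bottle gap drink (drinkWater bottle gap drink)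

-- ===== LEMMAS AND PROOFS =====

-- PySem floor division/mod by the positive literals 4 and 2, in omega-friendly ediv/emod form
theorem pvDiv4 (a : Int) : PySem.Int.floordiv a 4 = a / 4 := PySem.Int.floordiv_eq_ediv_of_pos (by norm_num)
theorem pvDiv2 (a : Int) : PySem.Int.floordiv a 2 = a / 2 := PySem.Int.floordiv_eq_ediv_of_pos (by norm_num)
theorem pvMod4 (a : Int) : PySem.Int.mod a 4 = a % 4 := PySem.Int.mod_eq_emod_of_pos (by norm_num)
theorem pvMod2 (a : Int) : PySem.Int.mod a 2 = a % 2 := PySem.Int.mod_eq_emod_of_pos (by norm_num)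

-- the exchange step strictly decreases pvMu whenever the guard allows another round
theorem pvMu_lt (b g b' g' : Int) (h : ¬(b < 4 ∧ g < 2))
    (hb : b' = b % 4 + (b / 4 + g / 2)) (hg : g' = g % 2 + (b / 4 + g / 2)) :
    pvMu b' g' < pvMu b g := by
  subst hb; subst hg
  unfold pvMu
  split_ifs <;> omega

-- B's loop computes exactly A's recursion when seeded with the same accumulator and fuel
theorem loop_eq_A (n : Nat) : ∀ (b g t : Int), pvMu b g ≤ n →
    drinkWaterLoopGo n b g t = drinkWaterGo n b g t := by
  induction n with
  | zero => intro b g t _; rfl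
  | succ n ih =>
    intro b g t h
    by_cases hguard : b < 4 ∧ g < 2
    · have h2 : ¬(b ≥ 4 ∨ g ≥ 2) := by omega
      rw [drinkWaterLoopGo, drinkWaterGo, if_neg h2, if_pos hguard]
    · have h2 : b ≥ 4 ∨ g ≥ 2 := by omega
      rw [drinkWaterLoopGo, drinkWaterGo, if_pos h2, if_neg hguard]
      simp only [pvDiv4, pvDiv2, pvMod4, pvMod2]
      have hlt := pvMu_lt b g (b % 4 + (b / 4 + g / 2)) (g % 2 + (b / 4 + g / 2)) hguard
        (by ring) (by ring)
      rw [ih (b % 4 + (b / 4 + g / 2)) (g % 2 + (b / 4 + g / 2)) (t + (b / 4 + g / 2)) (by omega)]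
      have q1 : b % 4 + (b / 4 + g / 2) = g / 2 + b / 4 + b % 4 := by ring
      have q2 : g % 2 + (b / 4 + g / 2) = g / 2 + b / 4 + g % 2 := by ring
      have q3 : t + (b / 4 + g / 2) = t + (g / 2 + b / 4) := by ring
      rw [q1, q2, q3]

-- A's accumulator can be split off the recursion: Go n b g d = d + Go n b g 0
theorem A_shift (n : Nat) : ∀ (b g d : Int), pvMu b g ≤ n →
    drinkWaterGo n b g d = d + drinkWaterGo n b g 0 := by
  induction n with
  | zero => intro b g d _; simp [drinkWaterGo]
  | succ n ih =>
    intro b g d h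
    by_cases hguard : b < 4 ∧ g < 2
    · rw [drinkWaterGo, drinkWaterGo, if_pos hguard, if_pos hguard]; ring
    · rw [drinkWaterGo, drinkWaterGo, if_neg hguard, if_neg hguard]
      simp only [pvDiv4, pvDiv2, pvMod4, pvMod2]
      have hlt := pvMu_lt b g (g / 2 + b / 4 + b % 4) (g / 2 + b / 4 + g % 2) hguard
        (by ring) (by ring)
      rw [ih (g / 2 + b / 4 + b % 4) (g / 2 + b / 4 + g % 2) (d + (g / 2 + b / 4)) (by omega),
          ih (g / 2 + b / 4 + b % 4) (g / 2 + b / 4 + g % 2) (0 + (g / 2 + b / 4)) (by omega)]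
      ring

-- ===== VERDICT (by name: the statement is the Claim_ definition above) =====
theorem drinkWater_spec : Claim_equal_drinkWater := by
  intro bottle gap drink _
  unfold Spec_drinkWater drinkWater_alt drinkWater
  rw [loop_eq_A (pvMu bottle gap) bottle gap 0 (le_refl _),
      A_shift (pvMu bottle gap) bottle gap drink (le_refl _)]
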